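-- pv_equiv track=rewrite | github.com/cook1e-0707/tokenizer-evidence | scripts/natural_evidence_v1/generate_reference_outputs.py | _built_in_prompts
-- ===== SOURCE A (Python) =====
-- PROMPT_TEMPLATES = (
--     "Give a concise plan for preparing a safe weekend {topic}.",
--     "Write a short practical checklist for {topic}.",
--     "Explain the main tradeoffs when planning {topic} in plain language.",
--     "Summarize three steps someone should take before starting {topic}.",
--     "Draft a brief advisory note about {topic} for a careful beginner.",
--     "Compare two sensible approaches to {topic} and recommend one.",
--     "List the most important risks in {topic} and how to reduce them.",
--     "Give a calm, direct answer to a friend asking for help with {topic}.",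
-- )
--
-- TOPICS = (
--     "a weekend hike",
--     "a train trip",
--     "a small home repair",
--     "a family budget review",
--     "a study schedule",
--     "a team project kickoff",
--     "a garden planting plan",
--     "a healthy meal plan",
--     "a conference packing list",
--     "a software release checklist",
--     "a museum day visit",
--     "a neighborhood cleanup",
--     "a personal data backup",
--     "a first apartment move",
--     "a public talk outline",
--     "a volunteer event",
--     "an office relocation",
--     "a fitness routine",
--     "a morning commute change",
--     "a basic emergency kit",
--     "a customer support reply",
--     "a reading plan",
--     "a small workshop agenda",
--     "a weather-aware travel plan",
-- )
--
-- def _built_in_prompts(count: int) -> list[dict[str, str]]: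
--     rows: list[dict[str, str]] = []
--     for index in range(max(0, count)):
--         template = PROMPT_TEMPLATES[index % len(PROMPT_TEMPLATES)]
--         topic = TOPICS[(index // len(PROMPT_TEMPLATES)) % len(TOPICS)]
--         variant = index // (len(PROMPT_TEMPLATES) * len(TOPICS))
--         user_probe = template.format(topic=topic)
--         if variant:
--             user_probe = f"{user_probe} Keep the answer concrete and avoid unnecessary detail."
--         rows.append(
--             {
--                 "prompt_id": f"nat_prompt_{index:06d}",
--                 "user_probe": user_probe,
--                 "prompt_family": f"PF{(index % 4) + 1}",
--                 "topic": topic,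
--             }
--         )
--     return rows
-- ===== SOURCE B (Python) =====
-- PROMPT_TEMPLATES = (
--     "Give a concise plan for preparing a safe weekend {topic}.",
--     "Write a short practical checklist for {topic}.",
--     "Explain the main tradeoffs when planning {topic} in plain language.",
--     "Summarize three steps someone should take before starting {topic}.",
--     "Draft a brief advisory note about {topic} for a careful beginner.",
--     "Compare two sensible approaches to {topic} and recommend one.",
--     "List the most important risks in {topic} and how to reduce them.",
--     "Give a calm, direct answer to a friend asking for help with {topic}.",
-- )
--
-- TOPICS = (
--     "a weekend hike",
--     "a train trip",
--     "a small home repair",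
--     "a family budget review",
--     "a study schedule",
--     "a team project kickoff",
--     "a garden planting plan",
--     "a healthy meal plan",
--     "a conference packing list",
--     "a software release checklist",
--     "a museum day visit",
--     "a neighborhood cleanup",
--     "a personal data backup",
--     "a first apartment move",
--     "a public talk outline",
--     "a volunteer event",
--     "an office relocation",
--     "a fitness routine",
--     "a morning commute change",
--     "a basic emergency kit",
--     "a customer support reply",
--     "a reading plan",
--     "a small workshop agenda",
--     "a weather-aware travel plan",
-- )
--
-- # One full variant block (all 192 template x topic combinations, templates fastest),
-- # with the probe text and prompt family precomputed once.
-- _BLOCK = [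
--     (template.replace("{topic}", topic), "PF%d" % (i % 4 + 1), topic)
--     for i, (topic, template) in enumerate(
--         (topic, template) for topic in TOPICS for template in PROMPT_TEMPLATES
--     )
-- ]
--
-- _SUFFIX = " Keep the answer concrete and avoid unnecessary detail."
--
-- # the same block with the variant>=1 suffix already applied (shared row strings)
-- _BLOCK1 = [(probe + _SUFFIX, family, topic) for probe, family, topic in _BLOCK]
--
--
-- def _built_in_prompts(count: int) -> list[dict[str, str]]:
--     n = max(0, count)
--     rows: list = [None] * n  # preallocate; every slot is filled below
--     variant = 0
--     while variant * 192 < n: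
--         base = variant * 192
--         limit = min(192, n - base)
--         block = _BLOCK if variant == 0 else _BLOCK1
--         for off in range(limit):
--             probe, family, topic = block[off]
--             rows[base + off] = {
--                 "prompt_id": "nat_prompt_%06d" % (base + off),
--                 "user_probe": probe,
--                 "prompt_family": family,
--                 "topic": topic,
--             }
--         variant += 1
--     return rows
-- ===== Notes on version B (the rewrite author's own statement) =====
-- stated objective: faster
-- what changed: Replaces the single flat loop that recomputes template, topic, family and probe by modular arithmetic and string formatting for every index with a precomputed template-by-topic block (plus a suffixed copy) built once at module level, and an outer per-variant loop that fills a preallocated result list from that block, deriving only the prompt_id per row.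
import Mathlib
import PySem

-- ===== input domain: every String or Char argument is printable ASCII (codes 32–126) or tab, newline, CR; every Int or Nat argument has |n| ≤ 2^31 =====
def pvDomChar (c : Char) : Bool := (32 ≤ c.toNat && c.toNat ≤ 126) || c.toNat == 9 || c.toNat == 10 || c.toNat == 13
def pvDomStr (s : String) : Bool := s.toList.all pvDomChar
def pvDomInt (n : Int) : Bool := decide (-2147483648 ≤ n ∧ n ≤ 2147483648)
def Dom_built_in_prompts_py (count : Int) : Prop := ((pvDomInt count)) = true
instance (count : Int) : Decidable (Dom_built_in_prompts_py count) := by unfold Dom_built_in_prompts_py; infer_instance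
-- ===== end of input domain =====

-- B replaces A's per-index modular arithmetic and per-row template formatting by one precomputed
-- 192-row template×topic block iterated per variant (objective: faster by a constant factor,
-- the 192 format/replace results are computed once instead of once per row).

-- ===== PORT A =====
def pvTemplates : List String :=
  ["Give a concise plan for preparing a safe weekend {topic}.",
   "Write a short practical checklist for {topic}.",
   "Explain the main tradeoffs when planning {topic} in plain language.",
   "Summarize three steps someone should take before starting {topic}.",
   "Draft a brief advisory note about {topic} for a careful beginner.",
   "Compare two sensible approaches to {topic} and recommend one.",
   "List the most important risks in {topic} and how to reduce them.",
   "Give a calm, direct answer to a friend asking for help with {topic}."]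

def pvTopics : List String :=
  ["a weekend hike", "a train trip", "a small home repair", "a family budget review",
   "a study schedule", "a team project kickoff", "a garden planting plan", "a healthy meal plan",
   "a conference packing list", "a software release checklist", "a museum day visit",
   "a neighborhood cleanup", "a personal data backup", "a first apartment move",
   "a public talk outline", "a volunteer event", "an office relocation", "a fitness routine",
   "a morning commute change", "a basic emergency kit", "a customer support reply",
   "a reading plan", "a small workshop agenda", "a weather-aware travel plan"]

def pvSuffix : String := " Keep the answer concrete and avoid unnecessary detail."

-- f"{i:06d}" for the indices both programs format (always ≥ 0 here) = str(i).zfill(6)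
def pvPad6 (i : Int) : String := PySem.Str.zfill (PySem.Int.toStr i) 6

-- the body of A's loop (indices are the Nat values of Python's nonnegative loop index);
-- list indexing is always in range (index % len), so getD is exact
def pvRowA (i : Nat) : List (String × String) :=
  let template := pvTemplates.getD (i % pvTemplates.length) ""
  let topic := pvTopics.getD ((i / pvTemplates.length) % pvTopics.length) ""
  let variant := i / (pvTemplates.length * pvTopics.length)
  let userProbe := PySem.Str.replace template "{topic}" topic
  let userProbe := if variant ≠ 0 then userProbe ++ pvSuffix else userProbe
  [("prompt_id", "nat_prompt_" ++ pvPad6 (i : Int)),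
   ("user_probe", userProbe),
   ("prompt_family", "PF" ++ PySem.Int.toStr ((i % 4 : Nat) + 1)),
   ("topic", topic)]

def built_in_prompts_py (count : Int) : List (List (String × String)) :=
  (List.range (max 0 count).toNat).foldl (fun rows i => rows ++ [pvRowA i]) []

-- ===== PORT B =====
-- the precomputed block: all 192 topic×template combinations (templates fastest), enumerated
def pvBlock : List (String × String × String) :=
  (PySem.List.enumerate
      (pvTopics.flatMap (fun topic => pvTemplates.map (fun template => (topic, template))))).map
    (fun p => (PySem.Str.replace p.2.2 "{topic}" p.2.1,
               "PF" ++ PySem.Int.toStr (PySem.Int.mod p.1 4 + 1),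
               p.2.1))

-- the same block with the variant ≥ 1 suffix already applied
def pvBlock1 : List (String × String × String) :=
  pvBlock.map (fun e => (e.1 ++ pvSuffix, e.2.1, e.2.2))

-- the row B stores at position base+off (the body of B's inner loop)
def pvBRow (blk : List (String × String × String)) (base off : Nat) : List (String × String) :=
  let e := blk.getD off ("", "", "")
  [("prompt_id", "nat_prompt_" ++ pvPad6 ((base + off : Nat) : Int)),
   ("user_probe", e.1),
   ("prompt_family", e.2.1),
   ("topic", e.2.2)]

-- B's while-loop over variants, filling the preallocated list in place;
-- terminates because variant*192 grows past n
def pvLoopB (n variant : Nat) (rows : List (List (String × String))) :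
    List (List (String × String)) :=
  if _h : variant * 192 < n then
    let base := variant * 192
    let limit := min 192 (n - base)
    let blk := if variant = 0 then pvBlock else pvBlock1
    pvLoopB n (variant + 1)
      ((List.range limit).foldl (fun r off => r.set (base + off) (pvBRow blk base off)) rows)
  else rows
termination_by n - variant * 192
decreasing_by omega

-- Python preallocates rows = [None] * n and overwrites every slot before returning;
-- [] stands for the None placeholder (it is never left in the result)
def built_in_prompts_py_alt (count : Int) : List (List (String × String)) :=
  pvLoopB (max 0 count).toNat 0 (List.replicate (max 0 count).toNat [])

-- ===== PRECONDITION & SPEC =====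
def Spec_built_in_prompts_py (count : Int) (out : List (List (String × String))) : Prop := out = built_in_prompts_py_alt count
instance (count : Int) (out : List (List (String × String))) : Decidable (Spec_built_in_prompts_py count out) := by unfold Spec_built_in_prompts_py; infer_instance

-- ===== CLAIM (what is proved, stated in full; the proofs are below) =====
def Claim_equal_built_in_prompts_py : Prop := ∀ (count : Int), Dom_built_in_prompts_py count → Spec_built_in_prompts_py count (built_in_prompts_py count)

-- ===== LEMMAS AND PROOFS =====

-- what pvBlock's entry at position off is, as a function of off
def pvBlockRow (off : Nat) : String × String × String :=
  (PySem.Str.replace (pvTemplates.getD (off % 8) "") "{topic}" (pvTopics.getD (off / 8) ""),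
   "PF" ++ PySem.Int.toStr ((off % 4 : Nat) + 1),
   pvTopics.getD (off / 8) "")

-- enumerate over a (range m).map g list, index by index (general helper for pvBlock_eq)
theorem pvEnum_map_range {α : Type} (g : Nat → α) (m : Nat) :
    PySem.List.enumerate ((List.range m).map g)
      = (List.range m).map (fun (i : Nat) => ((i : Int), g i)) := by
  rw [PySem.List.enumerate_eq_zipIdx_map]
  apply List.ext_getElem
  · simp
  · intro i h1 h2
    simp

set_option maxHeartbeats 1000000 in
set_option maxRecDepth 20000 in
theorem pvPairs_eq :
    pvTopics.flatMap (fun topic => pvTemplates.map (fun template => (topic, template)))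
      = (List.range 192).map
          (fun off => (pvTopics.getD (off / 8) "", pvTemplates.getD (off % 8) "")) := by
  decide

theorem pvBlock_eq : pvBlock = (List.range 192).map pvBlockRow := by
  unfold pvBlock
  rw [pvPairs_eq, pvEnum_map_range, List.map_map]
  refine List.map_congr_left (fun off hoff => ?_)
  rw [List.mem_range] at hoff
  unfold pvBlockRow
  simp only [Function.comp]
  have hm : PySem.Int.mod (off : Int) 4 = ((off % 4 : Nat) : Int) := by
    exact_mod_cast PySem.Int.mod_natCast off 4
  rw [hm]

def pvBlockRow1 (off : Nat) : String × String × String :=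
  ((pvBlockRow off).1 ++ pvSuffix, (pvBlockRow off).2.1, (pvBlockRow off).2.2)

theorem pvBlock1_eq : pvBlock1 = (List.range 192).map pvBlockRow1 := by
  unfold pvBlock1 pvBlockRow1
  rw [pvBlock_eq, List.map_map]
  rfl

theorem pvBRow_eq_pvRowA (variant off : Nat) (hoff : off < 192) :
    pvBRow (if variant = 0 then pvBlock else pvBlock1) (variant * 192) off
      = pvRowA (variant * 192 + off) := by
  have hT : pvTemplates.length = 8 := rfl
  have hP : pvTopics.length = 24 := rfl
  have h1 : (variant * 192 + off) % 8 = off % 8 := by omega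
  have h2 : (variant * 192 + off) / 8 % 24 = off / 8 := by omega
  have h3 : (variant * 192 + off) / (8 * 24) = variant := by omega
  have h4 : (variant * 192 + off) % 4 = off % 4 := by omega
  unfold pvBRow pvRowA
  rw [hT, hP]
  by_cases hv : variant = 0
  · simp only [hv, if_pos]
    rw [pvBlock_eq, PySem.List.getD_map_range pvBlockRow 192 off _ hoff]
    unfold pvBlockRow
    subst hv
    simp only [Nat.zero_mul, Nat.zero_add]
    have hdz : off / (8 * 24) = 0 := by omega
    have hm2 : off / 8 % 24 = off / 8 := by omega
    simp [hdz, hm2]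
  · simp only [if_neg hv]
    rw [pvBlock1_eq, PySem.List.getD_map_range pvBlockRow1 192 off _ hoff]
    unfold pvBlockRow1 pvBlockRow
    rw [h1, h2, h3, h4]
    simp [hv]

-- sequential in-place writes rows[base+off] := f off, off = 0..limit-1, as a splice
theorem pvFill (f : Nat → List (String × String)) :
    ∀ (limit : Nat) (rows : List (List (String × String))) (base : Nat),
      base + limit ≤ rows.length →
      (List.range limit).foldl (fun r off => r.set (base + off) (f off)) rows
        = rows.take base ++ (List.range limit).map f ++ rows.drop (base + limit) := by
  intro limit
  induction limit with
  | zero =>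
    intro rows base h
    simp
  | succ limit ih =>
    intro rows base h
    rw [List.range_succ, List.foldl_append, ih rows base (by omega)]
    simp only [List.foldl_cons, List.foldl_nil]
    have hlt : base + limit < rows.length := by omega
    have hpre : (rows.take base ++ (List.range limit).map f).length = base + limit := by
      simp [List.length_take]; omega
    rw [List.set_append, hpre, if_neg (by omega), Nat.sub_self]
    rw [List.drop_eq_getElem_cons hlt, List.set_cons_zero, List.map_append]
    simp only [List.append_assoc, List.map_cons, List.map_nil, List.cons_append, List.nil_append,
      Nat.add_assoc]

set_option maxRecDepth 8192 in
theorem pvLoopB_eq_aux (n k : Nat) : ∀ (variant : Nat) (rows : List (List (String × String))),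
    rows.length = n → n - variant * 192 ≤ k →
    pvLoopB n variant rows
      = rows.take (variant * 192) ++ (List.range' (variant * 192) (n - variant * 192)).map pvRowA := by
  induction k with
  | zero =>
    intro variant rows hlen hk
    have h : ¬ variant * 192 < n := by omega
    rw [pvLoopB]
    simp only [dif_neg h]
    have hz : n - variant * 192 = 0 := by omega
    rw [hz, List.take_of_length_le (by omega)]
    simp
  | succ k ih =>
    intro variant rows hlen hk
    by_cases h : variant * 192 < n
    · have hkk : n - (variant + 1) * 192 ≤ k := by omega
      rw [pvLoopB]
      simp only [dif_pos h]
      rw [pvFill _ _ rows (variant * 192) (by omega)]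
      set base := variant * 192 with hbase
      set limit := min 192 (n - base) with hlimit
      have hmapfill : (List.range limit).map
            (pvBRow (if variant = 0 then pvBlock else pvBlock1) base)
          = (List.range' base limit).map pvRowA := by
        rw [List.range'_eq_map_range, List.map_map]
        refine List.map_congr_left (fun off hoff => ?_)
        rw [List.mem_range] at hoff
        exact pvBRow_eq_pvRowA variant off (by omega)
      rw [hmapfill]
      have hlen' : (rows.take base ++ (List.range' base limit).map pvRowA
            ++ rows.drop (base + limit)).length = n := by
        simp [List.length_take, List.length_drop]
        omega
      rw [ih (variant + 1) _ hlen' hkk]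
      by_cases h192 : 192 ≤ n - base
      · have hmin : limit = 192 := by omega
        have hnext : (variant + 1) * 192 = base + 192 := by rw [hbase]; ring
        have hplen : (rows.take base ++ (List.range' base limit).map pvRowA).length
            = (variant + 1) * 192 := by
          simp [List.length_take]
          omega
        have htake : ((rows.take base ++ (List.range' base limit).map pvRowA)
              ++ rows.drop (base + limit)).take ((variant + 1) * 192)
            = rows.take base ++ (List.range' base limit).map pvRowA := by
          rw [← hplen]
          exact List.take_left
        rw [htake, List.append_assoc]
        congr 1
        rw [← List.map_append, hmin, hnext]
        have hra := @List.range'_append base 192 (n - (base + 192)) 1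
        simp only [Nat.one_mul] at hra
        rw [hra]
        have h3 : 192 + (n - (base + 192)) = n - base := by omega
        rw [h3]
      · have hmin : limit = n - base := by omega
        have hdn : rows.drop (base + limit) = [] :=
          List.drop_eq_nil_of_le (by omega)
        have hz2 : n - (variant + 1) * 192 = 0 := by omega
        have htall : (rows.take base ++ (List.range' base limit).map pvRowA
              ++ rows.drop (base + limit)).take ((variant + 1) * 192)
            = rows.take base ++ (List.range' base limit).map pvRowA
              ++ rows.drop (base + limit) :=
          List.take_of_length_le (by rw [hlen']; omega)
        rw [htall, hz2, hdn, hmin]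
        simp
    · rw [pvLoopB]
      simp only [dif_neg h]
      have hz : n - variant * 192 = 0 := by omega
      rw [hz, List.take_of_length_le (by omega)]
      simp

-- ===== VERDICT (by name: the statement is the Claim_ definition above) =====
theorem built_in_prompts_py_spec : Claim_equal_built_in_prompts_py := by
  intro count _
  unfold Spec_built_in_prompts_py built_in_prompts_py built_in_prompts_py_alt
  rw [PySem.List.foldl_append_singleton_eq_map,
    pvLoopB_eq_aux (max 0 count).toNat ((max 0 count).toNat - 0 * 192) 0 _
      (by simp) (by omega)]
  simp [List.range_eq_range']
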